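-- pv_equiv track=rewrite | github.com/reykjavik-university/2020-3-T-111-PROG | exams/midterm2-2019/word_count.py | word_count_in_list
-- ===== SOURCE A (Python) =====
-- def word_count_in_list(word_list):
--     ''' Returns the number of words found in the specified list
--         , . ! ? are considered separate words when appear at the end
--         of a character sequence '''
--     word_count = 0
--     for word in word_list:
--         if word[-1] in [',', '.', '!', '?']:
--             word_count += 2
--         else:
--             word_count += 1
--     return word_count
-- ===== SOURCE B (Python) =====
-- def word_count_in_list(word_list):
--     ''' Returns the number of words found in the specified list
--         , . ! ? are considered separate words when appear at the end
--         of a character sequence '''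
--     last_chars = [word[-1] for word in word_list]
--     counts = {}
--     for c in last_chars:
--         counts[c] = counts.get(c, 0) + 1
--     return len(word_list) + sum(counts.get(p, 0) for p in ',.!?')
-- ===== Notes on version B (the rewrite author's own statement) =====
-- stated objective: alternative
-- what changed: Instead of A's single pass adding 1 or 2 per word, B builds a histogram (dict) of the words' last characters and computes the answer as len(word_list) plus the histogram's counts at the four punctuation keys.
import Mathlib
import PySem

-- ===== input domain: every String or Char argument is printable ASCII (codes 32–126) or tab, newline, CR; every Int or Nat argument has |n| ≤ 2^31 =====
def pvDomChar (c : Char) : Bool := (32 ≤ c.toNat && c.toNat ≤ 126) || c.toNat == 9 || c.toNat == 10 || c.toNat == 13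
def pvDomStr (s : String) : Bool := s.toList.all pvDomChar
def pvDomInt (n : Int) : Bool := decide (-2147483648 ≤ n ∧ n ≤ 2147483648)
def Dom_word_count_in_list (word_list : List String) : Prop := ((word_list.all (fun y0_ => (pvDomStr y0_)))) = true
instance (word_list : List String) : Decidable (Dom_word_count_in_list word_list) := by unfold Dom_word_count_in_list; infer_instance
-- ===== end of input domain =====

-- B replaces A's running 1-or-2 accumulator with a histogram (dict) of last
-- characters plus len; same O(n). Pre_ excludes lists containing an empty
-- string, where word[-1] raises IndexError in both A and B.


-- ===== PORT A =====
def word_count_in_list (word_list : List String) : Int :=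
  word_list.foldl (fun word_count word =>
    match PySem.Str.pyGet? word (-1) with
    | some c => if c = ',' ∨ c = '.' ∨ c = '!' ∨ c = '?' then word_count + 2 else word_count + 1
    | none => word_count)   -- none = IndexError; unreachable under Pre_
    0

-- ===== PORT B =====
def word_count_in_list_alt (word_list : List String) : Int :=
  -- last_chars = [word[-1] for word in word_list]; none = IndexError, unreachable under Pre_
  let last_chars := word_list.map (fun word => PySem.Str.pyGet? word (-1))
  -- counts[c] = counts.get(c, 0) + 1 over last_chars
  let counts := last_chars.foldl (fun d c => d.insert c (d.getD c 0 + 1)) PySem.Dict.empty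
  -- len(word_list) + sum(counts.get(p, 0) for p in ',.!?')
  (word_list.length : Int) +
    ([(',' : Char), '.', '!', '?'].foldl (fun s p => s + counts.getD (some p) 0) 0)

-- ===== PRECONDITION & SPEC =====
-- Pre_ excludes lists containing an empty string: there word[-1] raises IndexError in A (and in B).
def Pre_word_count_in_list (word_list : List String) : Prop := ∀ w ∈ word_list, w ≠ ""
instance (word_list : List String) : Decidable (Pre_word_count_in_list word_list) := by unfold Pre_word_count_in_list; infer_instance
def pvWitness_word_count_in_list : List String := ["hello,", "world"]

def Spec_word_count_in_list (word_list : List String) (out : Int) : Prop := out = word_count_in_list_alt word_list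
instance (word_list : List String) (out : Int) : Decidable (Spec_word_count_in_list word_list out) := by unfold Spec_word_count_in_list; infer_instance

-- ===== CLAIM (what is proved, stated in full; the proofs are below) =====
def Claim_equal_word_count_in_list : Prop := ∀ (word_list : List String), Dom_word_count_in_list word_list → Pre_word_count_in_list word_list → Spec_word_count_in_list word_list (word_count_in_list word_list)

-- ===== LEMMAS AND PROOFS =====

-- A's fold equals length plus the counts of each punctuation mark among the last characters.
theorem afold_eq_counts (ws : List String) (acc : Int) (h : ∀ w ∈ ws, w ≠ "") :
    ws.foldl (fun word_count word =>
      match PySem.Str.pyGet? word (-1) with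
      | some c => if c = ',' ∨ c = '.' ∨ c = '!' ∨ c = '?' then word_count + 2 else word_count + 1
      | none => word_count) acc
    = acc + (ws.length : Int)
      + ((ws.map (fun word => PySem.Str.pyGet? word (-1))).count (some ',') : Int)
      + ((ws.map (fun word => PySem.Str.pyGet? word (-1))).count (some '.') : Int)
      + ((ws.map (fun word => PySem.Str.pyGet? word (-1))).count (some '!') : Int)
      + ((ws.map (fun word => PySem.Str.pyGet? word (-1))).count (some '?') : Int) := by
  induction ws generalizing acc with
  | nil => simp
  | cons w ws ih =>
    have hw : w ≠ "" := h w (List.mem_cons_self ..)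
    have hws : ∀ x ∈ ws, x ≠ "" := fun x hx => h x (List.mem_cons_of_mem _ hx)
    have hne : w.toList ≠ [] := fun hc => hw (by cases w; simp_all)
    obtain ⟨c, hc⟩ : ∃ c, PySem.Str.pyGet? w (-1) = some c := by
      cases hgl : w.toList.getLast? with
      | none => exact absurd (List.getLast?_eq_none_iff.mp hgl) hne
      | some c => exact ⟨c, by simp [PySem.Str.pyGet?, PySem.List.pyGet?_neg_one, hgl]⟩
    simp only [List.foldl_cons, List.map_cons, hc, List.count_cons, ih _ hws]
    by_cases hp : c = ',' ∨ c = '.' ∨ c = '!' ∨ c = '?'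
    · rcases hp with h1 | h1 | h1 | h1 <;> subst h1 <;> simp <;> ring
    · have h1 : c ≠ ',' := fun h => hp (Or.inl h)
      have h2 : c ≠ '.' := fun h => hp (Or.inr (Or.inl h))
      have h3 : c ≠ '!' := fun h => hp (Or.inr (Or.inr (Or.inl h)))
      have h4 : c ≠ '?' := fun h => hp (Or.inr (Or.inr (Or.inr h)))
      simp [h1, h2, h3, h4]
      ring

-- ===== VERDICT (by name: the statement is the Claim_ definition above) =====
theorem word_count_in_list_spec : Claim_equal_word_count_in_list := by
  intro word_list _ hpre
  unfold Spec_word_count_in_list word_count_in_list word_count_in_list_alt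
  simp only [PySem.Dict.foldl_insert_getD_add_one_eq_counter, List.foldl_cons, List.foldl_nil,
    PySem.Dict.getD_counter]
  rw [afold_eq_counts word_list 0 hpre]
  ring
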